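-- pv_equiv track=rewrite | github.com/rameshpav1321/daily_leetcode | 0209.minimum_size_subarray_sum.py | check_window_size
-- ===== SOURCE A (Python) =====
-- def check_window_size(nums, size, target):
--     curr_sum = sum(nums[:size])
--     if curr_sum >= target:
--         return True
--     for i in range(size, len(nums)):
--         curr_sum += nums[i] - nums[i - size]
--         if curr_sum >= target:
--             return True
--     return False
-- ===== SOURCE B (Python) =====
-- def check_window_size(nums, size, target):
--     # prefix sums: prefix[j] = sum(nums[:j])
--     prefix = [0]
--     p = 0
--     for x in nums:
--         p += x
--         prefix.append(p)
--     w = min(size, len(nums))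
--     return any(prefix[i + w] - prefix[i] >= target for i in range(len(nums) - w + 1))
-- ===== Notes on version B (the rewrite author's own statement) =====
-- stated objective: alternative
-- what changed: B precomputes a prefix-sum table in one pass and then tests each window as a difference of two prefix sums over an index range, instead of A's incremental sliding-window sum with early return inside the scan.
-- outside the precondition, e.g. on check_window_size([5, 3, 10, 3, 194, 3], -11, -1): A returns True, B raises IndexError; on check_window_size([5], -1, 0): A returns True, B returns True
import Mathlib
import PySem

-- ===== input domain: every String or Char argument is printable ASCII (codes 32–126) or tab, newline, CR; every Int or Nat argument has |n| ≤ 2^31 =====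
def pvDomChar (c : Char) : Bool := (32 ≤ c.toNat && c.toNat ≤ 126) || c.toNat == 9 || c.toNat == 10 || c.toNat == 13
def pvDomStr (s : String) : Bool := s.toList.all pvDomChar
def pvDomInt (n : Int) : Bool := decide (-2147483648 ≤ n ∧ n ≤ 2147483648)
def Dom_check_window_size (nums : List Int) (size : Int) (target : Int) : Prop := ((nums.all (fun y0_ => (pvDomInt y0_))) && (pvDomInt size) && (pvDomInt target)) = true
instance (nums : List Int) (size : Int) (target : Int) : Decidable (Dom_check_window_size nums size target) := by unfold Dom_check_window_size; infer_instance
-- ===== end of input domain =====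

-- B replaces A's incremental sliding-window sum by a prefix-sum table plus a
-- difference test over an index range (objective: alternative decomposition).

-- ===== PORT A =====
-- loop 'for i in range(size, len(nums)): curr_sum += nums[i] - nums[i-size]; if curr_sum >= target: return True'
-- (indices are always in range under Pre_ 0 ≤ size, so the default of pyGetD is never read)
def check_window_size_loop (nums : List Int) (size : Int) (target : Int) :
    List Int → Int → Bool
  | [], _ => false
  | i :: rest, c =>
      let c' := c + PySem.List.pyGetD nums i 0 - PySem.List.pyGetD nums (i - size) 0
      if c' ≥ target then true else check_window_size_loop nums size target rest c'

def check_window_size (nums : List Int) (size : Int) (target : Int) : Bool :=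
  let curr_sum := (PySem.List.slice nums none (some size)).sum
  if curr_sum ≥ target then true
  else check_window_size_loop nums size target
        (PySem.List.pyRange size (nums.length : Int) 1) curr_sum

-- ===== PORT B =====
-- 'for x in nums: p += x; prefix.append(p)' (prefix starts as [0])
def check_window_size_pref : List Int → Int → List Int
  | [], _ => []
  | x :: xs, p => (p + x) :: check_window_size_pref xs (p + x)

def check_window_size_alt (nums : List Int) (size : Int) (target : Int) : Bool :=
  let pfx := 0 :: check_window_size_pref nums 0
  let w := min size (nums.length : Int)
  (PySem.List.pyRange 0 ((nums.length : Int) - w + 1) 1).any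
    (fun i => PySem.List.pyGetD pfx (i + w) 0 - PySem.List.pyGetD pfx i 0 ≥ target)

-- ===== PRECONDITION & SPEC =====
-- Pre_ restricts to the natural domain of a window size: size ≥ 0. For negative
-- size A indexes nums[i-size] past the end and raises IndexError on most inputs
-- (negative window sizes are meaningless for this task), so they are excluded.
def Pre_check_window_size (nums : List Int) (size : Int) (target : Int) : Prop := 0 ≤ size
instance (nums : List Int) (size : Int) (target : Int) : Decidable (Pre_check_window_size nums size target) := by unfold Pre_check_window_size; infer_instance
def pvWitness_check_window_size : List Int × Int × Int := ([2, 1, 3], 2, 4)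

def Spec_check_window_size (nums : List Int) (size : Int) (target : Int) (out : Bool) : Prop := out = check_window_size_alt nums size target
instance (nums : List Int) (size : Int) (target : Int) (out : Bool) : Decidable (Spec_check_window_size nums size target out) := by unfold Spec_check_window_size; infer_instance

-- ===== CLAIM (what is proved, stated in full; the proofs are below) =====
def Claim_equal_check_window_size : Prop := ∀ (nums : List Int) (size : Int) (target : Int), Dom_check_window_size nums size target → Pre_check_window_size nums size target → Spec_check_window_size nums size target (check_window_size nums size target)

-- ===== LEMMAS AND PROOFS =====

-- prefix sum of the first j elements
def pvS (nums : List Int) (j : Nat) : Int := (nums.take j).sum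

theorem pvS_succ (nums : List Int) (k : Nat) (h : k < nums.length) :
    pvS nums (k + 1) = pvS nums k + nums[k] :=
  List.sum_take_succ nums k h

theorem pref_eq_map (nums : List Int) (p : Int) :
    check_window_size_pref nums p
      = (List.range nums.length).map (fun k => p + (nums.take (k + 1)).sum) := by
  induction nums generalizing p with
  | nil => simp [check_window_size_pref]
  | cons x xs ih =>
      simp only [check_window_size_pref, ih, List.length_cons,
        List.range_succ_eq_map, List.map_cons, List.map_map]
      congr 1
      · simp
      · apply List.map_congr_left
        intro k _
        simp [List.take_succ_cons]
        ring

theorem prefix_eq_map (nums : List Int) :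
    (0 : Int) :: check_window_size_pref nums 0
      = (List.range (nums.length + 1)).map (fun j => pvS nums j) := by
  rw [pref_eq_map, List.range_succ_eq_map, List.map_cons, List.map_map]
  congr 1
  · simp [pvS]

theorem prefix_get (nums : List Int) (j : Int) (h0 : 0 ≤ j) (h1 : j ≤ nums.length) :
    PySem.List.pyGetD ((0 : Int) :: check_window_size_pref nums 0) j 0 = pvS nums j.toNat := by
  rw [prefix_eq_map]
  have hj : j = (j.toNat : Int) := by omega
  rw [hj, PySem.List.pyGetD_natCast,
    PySem.List.getD_map_range (fun j => pvS nums j) (nums.length + 1) j.toNat 0 (by omega)]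
  congr 1

-- B = true ↔ some window of width w = min size n clears target
theorem alt_iff (nums : List Int) (size target : Int) (hs : 0 ≤ size) :
    check_window_size_alt nums size target = true ↔
      ∃ k : Int, 0 ≤ k ∧ k ≤ (nums.length : Int) - min size (nums.length : Int) ∧
        pvS nums (k + min size (nums.length : Int)).toNat - pvS nums k.toNat ≥ target := by
  unfold check_window_size_alt
  simp only [List.any_eq_true, PySem.List.mem_pyRange_one, decide_eq_true_eq]
  constructor
  · rintro ⟨i, ⟨h0, h1⟩, hp⟩
    refine ⟨i, h0, by omega, ?_⟩
    rw [prefix_get nums (i + min size (nums.length : Int)) (by omega) (by omega),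
        prefix_get nums i h0 (by omega)] at hp
    exact hp
  · rintro ⟨k, h0, h1, hp⟩
    refine ⟨k, ⟨h0, by omega⟩, ?_⟩
    rw [prefix_get nums (k + min size (nums.length : Int)) (by omega) (by omega),
        prefix_get nums k h0 (by omega)]
    exact hp

-- A's loop, entered at index i with accumulator S i - S (i - size), scans windows ending at i..n-1
theorem loop_iff (nums : List Int) (size target : Int) (hs : 0 ≤ size) :
    ∀ (i : Int), size ≤ i → i ≤ (nums.length : Int) →
    (check_window_size_loop nums size target
        (PySem.List.pyRange i (nums.length : Int) 1)
        (pvS nums i.toNat - pvS nums (i - size).toNat) = true ↔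
      ∃ j : Int, i ≤ j ∧ j < (nums.length : Int) ∧
        pvS nums (j + 1).toNat - pvS nums (j + 1 - size).toNat ≥ target) := by
  intro i hsi hin
  obtain ⟨m, hm⟩ : ∃ m : Nat, (nums.length : Int) - i = (m : Int) := ⟨((nums.length : Int) - i).toNat, by omega⟩
  induction m generalizing i with
  | zero =>
      rw [PySem.List.pyRange_one_eq_nil (by omega)]
      simp only [check_window_size_loop]
      constructor
      · intro h; cases h
      · rintro ⟨j, h1, h2, _⟩; omega
  | succ m ih =>
      have hlt : i < (nums.length : Int) := by omega
      rw [PySem.List.pyRange_one_cons hlt]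
      simp only [check_window_size_loop]
      have hg1 : PySem.List.pyGetD nums i 0 = nums[i.toNat]'(by omega) :=
        PySem.List.pyGetD_eq_getElem nums 0 (by omega) (by omega)
      have hg2 : PySem.List.pyGetD nums (i - size) 0 = nums[(i - size).toNat]'(by omega) :=
        PySem.List.pyGetD_eq_getElem nums 0 (by omega) (by omega)
      have hc : pvS nums i.toNat - pvS nums (i - size).toNat
            + PySem.List.pyGetD nums i 0 - PySem.List.pyGetD nums (i - size) 0
          = pvS nums (i + 1).toNat - pvS nums (i + 1 - size).toNat := by
        rw [hg1, hg2]
        have e1 : (i + 1).toNat = i.toNat + 1 := by omega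
        have e2 : (i + 1 - size).toNat = (i - size).toNat + 1 := by omega
        rw [e1, e2, pvS_succ nums i.toNat (by omega), pvS_succ nums (i - size).toNat (by omega)]
        ring
      rw [hc]
      by_cases hhit : pvS nums (i + 1).toNat - pvS nums (i + 1 - size).toNat ≥ target
      · simp only [if_pos hhit]
        exact ⟨fun _ => ⟨i, le_refl _, hlt, hhit⟩, fun _ => trivial⟩
      · simp only [if_neg hhit]
        rw [ih (i + 1) (by omega) (by omega) (by omega)]
        constructor
        · rintro ⟨j, h1, h2, h3⟩; exact ⟨j, by omega, h2, h3⟩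
        · rintro ⟨j, h1, h2, h3⟩
          refine ⟨j, ?_, h2, h3⟩
          rcases eq_or_lt_of_le h1 with rfl | h
          · exact absurd h3 hhit
          · omega

theorem take_sum_clamp (nums : List Int) (j : Nat) (h : nums.length ≤ j) :
    pvS nums j = pvS nums nums.length := by
  unfold pvS
  rw [List.take_of_length_le h, List.take_of_length_le (le_refl _)]

-- A = true ↔ the same condition as B
theorem a_iff (nums : List Int) (size target : Int) (hs : 0 ≤ size) :
    check_window_size nums size target = true ↔
      ∃ k : Int, 0 ≤ k ∧ k ≤ (nums.length : Int) - min size (nums.length : Int) ∧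
        pvS nums (k + min size (nums.length : Int)).toNat - pvS nums k.toNat ≥ target := by
  unfold check_window_size
  have hslice : PySem.List.slice nums none (some size) = nums.take size.toNat :=
    PySem.List.slice_to nums hs
  by_cases hbig : (nums.length : Int) ≤ size
  · -- size ≥ n : loop range is empty, only the full-array check
    have hw : min size (nums.length : Int) = (nums.length : Int) := by omega
    have hc : (PySem.List.slice nums none (some size)).sum = pvS nums nums.length := by
      rw [hslice]
      exact take_sum_clamp nums size.toNat (by omega)
    rw [PySem.List.pyRange_one_eq_nil (by omega)]
    by_cases h0 : (PySem.List.slice nums none (some size)).sum ≥ target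
    · simp only [if_pos h0, true_iff]
      refine ⟨0, le_refl _, by omega, ?_⟩
      rw [hc] at h0
      simp only [hw, zero_add, Int.toNat_natCast]
      simpa [pvS] using h0
    · simp only [if_neg h0, check_window_size_loop]
      constructor
      · intro h; cases h
      · rintro ⟨k, h1, h2, h3⟩
        exfalso
        have hk : k = 0 := by omega
        subst hk
        rw [hc] at h0
        apply h0
        rw [hw] at h3
        simpa [pvS] using h3
  · -- size < n
    have hw : min size (nums.length : Int) = size := by omega
    have hc0 : (PySem.List.slice nums none (some size)).sum = pvS nums size.toNat := by
      rw [hslice]; rfl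
    by_cases h0 : (PySem.List.slice nums none (some size)).sum ≥ target
    · simp only [if_pos h0, true_iff]
      refine ⟨0, le_refl _, by omega, ?_⟩
      rw [hc0] at h0
      rw [hw]
      simpa [pvS] using h0
    · simp only [if_neg h0]
      have hacc : (PySem.List.slice nums none (some size)).sum
          = pvS nums size.toNat - pvS nums (size - size).toNat := by
        rw [hc0]; simp [pvS]
      rw [hacc, loop_iff nums size target hs size (le_refl _) (by omega)]
      constructor
      · rintro ⟨j, h1, h2, h3⟩
        refine ⟨j + 1 - size, by omega, by omega, ?_⟩
        rw [hw]
        have e : j + 1 - size + size = j + 1 := by omega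
        rw [e]; exact h3
      · rintro ⟨k, h1, h2, h3⟩
        rw [hw] at h3
        rcases eq_or_lt_of_le h1 with rfl | hpos
        · exfalso
          apply h0
          rw [hc0]
          have e : (0 : Int) + size = size := by omega
          rw [e] at h3
          have : pvS nums (0 : Int).toNat = 0 := by simp [pvS]
          omega
        · refine ⟨k + size - 1, by omega, by omega, ?_⟩
          have e2 : k + size - 1 + 1 - size = k := by omega
          have e1 : k + size - 1 + 1 = k + size := by omega
          rw [e2, e1]
          exact h3

-- ===== VERDICT (by name: the statement is the Claim_ definition above) =====
theorem check_window_size_spec : Claim_equal_check_window_size := by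
  intro nums size target _ hpre
  unfold Spec_check_window_size
  have hs : 0 ≤ size := hpre
  rcases hA : check_window_size nums size target with _ | _
  · rcases hB : check_window_size_alt nums size target with _ | _
    · rfl
    · exfalso
      have := (a_iff nums size target hs).mpr ((alt_iff nums size target hs).mp hB)
      rw [hA] at this; cases this
  · exact ((alt_iff nums size target hs).mpr ((a_iff nums size target hs).mp hA)).symm
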